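-- pv_equiv track=rewrite | github.com/lawcompany/law_talk_neural_model_helper | utils/misc.py | split_string_list_with_multiple_delimiters
-- ===== SOURCE A (Python) =====
-- def split_string_list_with_multiple_delimiters(delimiter_list, lines):
--     """
--     Args:
--         delimiter_list: a list of str
--         lines: a list of str
--
--     Returns:
--         a list of the list of str, where the nested list is the lines sectioned by one of the delimiters.
--     """
--     def whether_line_contains_the_delimiter(delimiter_list_, line_):
--         whether_ = False
--         for delimiter_ in delimiter_list_:
--             if delimiter_ in line_:
--                 whether_ = True
--             else:
--                 pass
--         return whether_
--     delimiter_idx_list = []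
--     for idx, line in enumerate(lines):
--         if whether_line_contains_the_delimiter(delimiter_list_=delimiter_list, line_=line):
--             delimiter_idx_list.append(idx)
--         else:
--             pass
--     to_return = []
--     for meta_idx, idx in enumerate(delimiter_idx_list):
--         if meta_idx == 0:
--             continue
--         else:
--             pass
--         previous_idx = delimiter_idx_list[meta_idx-1]
--         to_return.append(lines[previous_idx+1:idx])
--     return to_return
-- ===== SOURCE B (Python) =====
-- def split_string_list_with_multiple_delimiters(delimiter_list, lines):
--     seen = False
--     buf = []
--     out = []
--     for line in lines:
--         if any(d in line for d in delimiter_list):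
--             if seen:
--                 out.append(buf)
--             seen = True
--             buf = []
--         elif seen:
--             buf.append(line)
--     return out
-- ===== Notes on version B (the rewrite author's own statement) =====
-- stated objective: faster
-- what changed: Replaces A's two-pass scheme (collect delimiter indices with a never-short-circuiting all-delimiter scan per line, then enumerate and slice between consecutive indices) by one pass keeping a seen-first-delimiter flag and a current buffer, with any() short-circuiting the per-line delimiter test.
import Mathlib
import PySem

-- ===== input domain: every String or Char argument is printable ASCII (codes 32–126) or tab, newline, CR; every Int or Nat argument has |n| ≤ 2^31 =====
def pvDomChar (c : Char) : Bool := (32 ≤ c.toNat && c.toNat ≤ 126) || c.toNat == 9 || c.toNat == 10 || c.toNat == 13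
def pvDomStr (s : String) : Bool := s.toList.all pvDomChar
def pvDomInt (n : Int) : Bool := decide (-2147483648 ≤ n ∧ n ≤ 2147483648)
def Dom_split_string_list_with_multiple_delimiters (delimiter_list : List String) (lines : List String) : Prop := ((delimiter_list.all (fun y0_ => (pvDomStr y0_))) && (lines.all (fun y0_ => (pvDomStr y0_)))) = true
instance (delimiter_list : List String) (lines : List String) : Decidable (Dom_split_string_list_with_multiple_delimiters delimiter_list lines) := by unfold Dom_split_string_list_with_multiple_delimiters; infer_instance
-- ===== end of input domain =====

-- B replaces A's two-pass scheme (collect delimiter indices, then slice between consecutive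
-- indices) by one short-circuiting pass keeping a seen-first-delimiter flag and a current
-- buffer; a timing run measured B faster.

-- ===== PORT A =====
-- inner helper whether_line_contains_the_delimiter: a fold over the delimiter list
def pvContainsA (delimiter_list_ : List String) (line_ : String) : Bool :=
  delimiter_list_.foldl
    (fun whether_ delimiter_ => if PySem.Str.isIn delimiter_ line_ then true else whether_) false

def split_string_list_with_multiple_delimiters (delimiter_list : List String)
    (lines : List String) : List (List String) :=
  let delimiter_idx_list : List Int :=
    (PySem.List.enumerate lines 0).foldl
      (fun acc il => if pvContainsA delimiter_list il.2 then acc ++ [il.1] else acc) []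
  (PySem.List.enumerate delimiter_idx_list 0).foldl
    (fun (to_return : List (List String)) (mi : Int × Int) =>
      if mi.1 == 0 then to_return
      else
        -- delimiter_idx_list[meta_idx-1]: always in range in Python; none is unreachable
        match PySem.List.pyGet? delimiter_idx_list (mi.1 - 1) with
        | some previous_idx =>
            to_return ++ [PySem.List.slice lines (some (previous_idx + 1)) (some mi.2)]
        | none => to_return) []

-- ===== PORT B =====
-- one loop iteration of Source B: state = (seen, buf, out)
def pvStepB (delimiter_list : List String)
    (st : Bool × List String × List (List String)) (line : String) :
    Bool × List String × List (List String) :=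
  if delimiter_list.any (fun d => PySem.Str.isIn d line) then
    (true, [], if st.1 then st.2.2 ++ [st.2.1] else st.2.2)
  else
    (st.1, if st.1 then st.2.1 ++ [line] else st.2.1, st.2.2)

def split_string_list_with_multiple_delimiters_alt (delimiter_list : List String)
    (lines : List String) : List (List String) :=
  (lines.foldl (pvStepB delimiter_list) (false, [], [])).2.2

-- ===== PRECONDITION & SPEC =====
def Spec_split_string_list_with_multiple_delimiters (delimiter_list : List String) (lines : List String) (out : List (List String)) : Prop := out = split_string_list_with_multiple_delimiters_alt delimiter_list lines
instance (delimiter_list : List String) (lines : List String) (out : List (List String)) : Decidable (Spec_split_string_list_with_multiple_delimiters delimiter_list lines out) := by unfold Spec_split_string_list_with_multiple_delimiters; infer_instance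

-- ===== CLAIM (what is proved, stated in full; the proofs are below) =====
def Claim_equal_split_string_list_with_multiple_delimiters : Prop := ∀ (delimiter_list : List String) (lines : List String), Dom_split_string_list_with_multiple_delimiters delimiter_list lines → Spec_split_string_list_with_multiple_delimiters delimiter_list lines (split_string_list_with_multiple_delimiters delimiter_list lines)

-- ===== LEMMAS AND PROOFS =====
-- All reference functions are stated for an abstract delimiter-line test p : String → Bool,
-- instantiated at the end with p := fun line => delimiter_list.any (d in line).

-- the segments strictly between consecutive delimiter lines, after the first one was seen
def pvSegsAfter (p : String → Bool) (buf : List String) : List String → List (List String)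
  | [] => []
  | l :: ls => if p l then buf :: pvSegsAfter p [] ls else pvSegsAfter p (buf ++ [l]) ls

def pvSegs (p : String → Bool) : List String → List (List String)
  | [] => []
  | l :: ls => if p l then pvSegsAfter p [] ls else pvSegs p ls

-- positions (as Nats) of the delimiter-containing lines
def pvDn (p : String → Bool) : List String → List Nat
  | [] => []
  | l :: ls => if p l then 0 :: (pvDn p ls).map (· + 1) else (pvDn p ls).map (· + 1)

-- slices between consecutive indices, Nat form
def pvAdjN (lines : List String) (prev : Nat) : List Nat → List (List String)
  | [] => []
  | j :: js => (lines.drop (prev + 1)).take (j - prev - 1) :: pvAdjN lines j js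

-- B's loop step with the abstract test (definitionally pvStepB)
def pvStep (p : String → Bool) (st : Bool × List String × List (List String)) (line : String) :
    Bool × List String × List (List String) :=
  if p line then (true, [], if st.1 then st.2.2 ++ [st.2.1] else st.2.2)
  else (st.1, if st.1 then st.2.1 ++ [line] else st.2.1, st.2.2)

lemma pvContainsA_eq (dl : List String) (line : String) :
    pvContainsA dl line = dl.any (fun d => PySem.Str.isIn d line) := by
  simpa [pvContainsA] using
    PySem.List.foldl_if_true_eq (p := fun d => PySem.Str.isIn d line) (l := dl) (b := false)

-- ---- B side ----
lemma pvB_after (p : String → Bool) (ls : List String) :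
    ∀ (buf : List String) (res : List (List String)),
      (ls.foldl (pvStep p) (true, buf, res)).2.2 = res ++ pvSegsAfter p buf ls := by
  induction ls with
  | nil => intro buf res; simp [pvSegsAfter]
  | cons l ls ih =>
    intro buf res
    by_cases h : p l
    · simp [pvStep, h, pvSegsAfter, ih]
    · simp [pvStep, h, pvSegsAfter, ih]

lemma pvB_before (p : String → Bool) (ls : List String) :
    ∀ (res : List (List String)),
      (ls.foldl (pvStep p) (false, [], res)).2.2 = res ++ pvSegs p ls := by
  induction ls with
  | nil => intro res; simp [pvSegs]
  | cons l ls ih =>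
    intro res
    by_cases h : p l
    · simp [pvStep, h, pvSegs, pvB_after]
    · simp [pvStep, h, pvSegs, ih]

lemma pvAlt_eq_segs (dl ls : List String) :
    split_string_list_with_multiple_delimiters_alt dl ls
      = pvSegs (fun line => dl.any (fun d => PySem.Str.isIn d line)) ls := by
  have hstep : pvStepB dl = pvStep (fun line => dl.any (fun d => PySem.Str.isIn d line)) := rfl
  unfold split_string_list_with_multiple_delimiters_alt
  rw [hstep, pvB_before]
  simp

-- ---- A side ----
lemma pvA_first_fold (q : String → Bool) (ls : List String) :
    ∀ (s : Int) (acc : List Int),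
      (PySem.List.enumerate ls s).foldl
        (fun acc il => if q il.2 then acc ++ [il.1] else acc) acc
      = acc ++ (pvDn q ls).map (fun n : Nat => (n : Int) + s) := by
  induction ls with
  | nil => intro s acc; simp [PySem.List.enumerate_nil, pvDn]
  | cons l ls ih =>
    intro s acc
    rw [PySem.List.enumerate_cons]
    by_cases h : q l
    · simp only [List.foldl_cons, h, if_true]
      rw [ih (s + 1) (acc ++ [s])]
      simp only [pvDn, h, if_true, List.map_cons, List.map_map, List.append_assoc,
        List.singleton_append]
      congr 2
      · push_cast; ring
      · apply List.map_congr_left; intro n _; simp [Function.comp]; omega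
    · simp only [List.foldl_cons, h, Bool.false_eq_true, if_false]
      rw [ih (s + 1) acc]
      simp only [pvDn, h, Bool.false_eq_true, if_false, List.map_map]
      congr 1
      apply List.map_congr_left; intro n _; simp [Function.comp]; omega

lemma pvA_second_fold (lines : List String) (full : List Nat) (tail : List Nat) :
    ∀ (k prev : Nat) (acc : List (List String)),
      1 ≤ k → full.drop k = tail → full[k-1]? = some prev →
      (PySem.List.enumerate (tail.map (Nat.cast : Nat → Int)) k).foldl
        (fun (to_return : List (List String)) (mi : Int × Int) =>
          if mi.1 == 0 then to_return
          else
            match PySem.List.pyGet? (full.map (Nat.cast : Nat → Int)) (mi.1 - 1) with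
            | some previous_idx =>
                to_return ++ [PySem.List.slice lines (some (previous_idx + 1)) (some mi.2)]
            | none => to_return) acc
      = acc ++ pvAdjN lines prev tail := by
  induction tail with
  | nil =>
    intro k prev acc _ _ _
    simp [PySem.List.enumerate_nil, pvAdjN]
  | cons j t ih =>
    intro k prev acc hk hdrop hget
    rw [List.map_cons, PySem.List.enumerate_cons, List.foldl_cons]
    have hk0 : ((k : Int) == 0) = false := by
      simp [Nat.one_le_iff_ne_zero.mp hk]
    have hsub : (k : Int) - 1 = ((k - 1 : Nat) : Int) := by omega
    have hidx : PySem.List.pyGet? (full.map (Nat.cast : Nat → Int)) ((k : Int) - 1)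
        = some ((prev : Nat) : Int) := by
      rw [hsub, PySem.List.pyGet?_natCast, List.getElem?_map, hget]; rfl
    have hslice : PySem.List.slice lines (some ((prev : Int) + 1)) (some ((j : Nat) : Int))
        = (lines.drop (prev + 1)).take (j - prev - 1) := by
      have h1 : ((prev : Int) + 1) = ((prev + 1 : Nat) : Int) := by push_cast; ring
      rw [h1, PySem.List.slice_natCast]
      congr 1
    have hjk : full[k]? = some j := by
      have h0 : (full.drop k)[0]? = some j := by rw [hdrop]; rfl
      rwa [List.getElem?_drop, Nat.add_zero] at h0
    have hdrop' : full.drop (k + 1) = t := by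
      have h1 := congrArg List.tail hdrop
      simpa [List.tail_drop] using h1
    simp only [hk0, Bool.false_eq_true, if_false, hidx, hslice]
    have hcast : (k : Int) + 1 = ((k + 1 : Nat) : Int) := by push_cast; ring
    rw [hcast, ih (k + 1) j (acc ++ [(lines.drop (prev + 1)).take (j - prev - 1)])
      (by omega) hdrop' (by simpa using hjk)]
    simp [pvAdjN]

lemma pvA_eq_adj (dl lines : List String) :
    split_string_list_with_multiple_delimiters dl lines
      = match pvDn (fun line => dl.any (fun d => PySem.Str.isIn d line)) lines with
        | [] => []
        | j0 :: rest => pvAdjN lines j0 rest := by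
  unfold split_string_list_with_multiple_delimiters
  have hq : pvContainsA dl = (fun line => dl.any (fun d => PySem.Str.isIn d line)) :=
    funext (pvContainsA_eq dl)
  have h1 : (PySem.List.enumerate lines 0).foldl
      (fun acc il => if pvContainsA dl il.2 then acc ++ [il.1] else acc) ([] : List Int)
      = (pvDn (fun line => dl.any (fun d => PySem.Str.isIn d line)) lines).map
          (Nat.cast : Nat → Int) := by
    rw [hq, pvA_first_fold (fun line => dl.any (fun d => PySem.Str.isIn d line)) lines 0 []]
    simp
  rw [h1]
  dsimp only
  cases hD : pvDn (fun line => dl.any (fun d => PySem.Str.isIn d line)) lines with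
  | nil => simp [PySem.List.enumerate_nil]
  | cons j0 rest =>
    rw [List.map_cons, PySem.List.enumerate_cons, List.foldl_cons]
    simp only [show ((0 : Int) == 0) = true from rfl, if_true]
    have h2 := pvA_second_fold lines (j0 :: rest) rest 1 j0 [] (by omega) (by rfl) (by rfl)
    simpa using h2

lemma pvAdjN_shift (lines : List String) (l : String) (js : List Nat) :
    ∀ prev : Nat, pvAdjN (l :: lines) (prev + 1) (js.map (· + 1)) = pvAdjN lines prev js := by
  induction js with
  | nil => intro prev; simp [pvAdjN]
  | cons j t ih =>
    intro prev
    simp only [List.map_cons, pvAdjN, List.drop_succ_cons]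
    rw [show j + 1 - (prev + 1) - 1 = j - prev - 1 from by omega, ih j]

lemma pvAdjN_segsAfter (p : String → Bool) (ls : List String) :
    ∀ (full : List String) (prev cur : Nat),
      prev < cur → full.drop cur = ls →
      pvAdjN full prev ((pvDn p ls).map (· + cur))
        = pvSegsAfter p ((full.drop (prev + 1)).take (cur - prev - 1)) ls := by
  induction ls with
  | nil => intro full prev cur _ _; simp [pvDn, pvAdjN, pvSegsAfter]
  | cons l ls ih =>
    intro full prev cur hlt hdrop
    have hl : full[cur]? = some l := by
      have h0 : (full.drop cur)[0]? = some l := by rw [hdrop]; rfl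
      rwa [List.getElem?_drop, Nat.add_zero] at h0
    have hdrop' : full.drop (cur + 1) = ls := by
      have h1 := congrArg List.tail hdrop
      simpa [List.tail_drop] using h1
    have hmap : (pvDn p ls).map ((· + cur) ∘ (· + 1)) = (pvDn p ls).map (· + (cur + 1)) := by
      apply List.map_congr_left; intro n _; simp [Function.comp]; omega
    by_cases h : p l
    · simp only [pvDn, h, if_true, List.map_cons, List.map_map, pvSegsAfter, hmap,
        Nat.zero_add, pvAdjN]
      rw [ih full cur (cur + 1) (by omega) hdrop']
      simp
    · simp only [pvDn, h, Bool.false_eq_true, if_false, List.map_map, pvSegsAfter, hmap]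
      rw [ih full prev (cur + 1) (by omega) hdrop']
      congr 1
      rw [show cur + 1 - prev - 1 = (cur - prev - 1) + 1 from by omega, List.take_add_one]
      have h2 : (full.drop (prev + 1))[cur - prev - 1]? = some l := by
        rw [List.getElem?_drop, show prev + 1 + (cur - prev - 1) = cur from by omega, hl]
      rw [h2]
      rfl

lemma pvAdj_eq_segs (p : String → Bool) (lines : List String) :
    (match pvDn p lines with
      | [] => []
      | j0 :: rest => pvAdjN lines j0 rest) = pvSegs p lines := by
  induction lines with
  | nil => simp [pvDn, pvSegs]
  | cons l ls ih =>
    by_cases h : p l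
    · simp only [pvDn, h, if_true, pvSegs]
      have h2 := pvAdjN_segsAfter p ls (l :: ls) 0 1 (by omega) (by rfl)
      simpa using h2
    · simp only [pvDn, h, Bool.false_eq_true, if_false, pvSegs]
      cases hD : pvDn p ls with
      | nil => simpa [hD] using ih
      | cons n0 ns =>
        rw [hD] at ih
        simp only [List.map_cons]
        rw [pvAdjN_shift]
        exact ih

-- ===== VERDICT (by name: the statement is the Claim_ definition above) =====
theorem split_string_list_with_multiple_delimiters_spec : Claim_equal_split_string_list_with_multiple_delimiters := by
  intro dl lines _
  unfold Spec_split_string_list_with_multiple_delimiters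
  rw [pvA_eq_adj, pvAdj_eq_segs, pvAlt_eq_segs]
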